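-- pv_equiv track=rewrite | github.com/billHuangFeng/qbm-ai-system | backend/src/services/ai_influence/influence_propagator.py | _assess_conflict_severity
-- ===== SOURCE A (Python) =====
-- from typing import Dict, List, Any, Optional
--
-- def _assess_conflict_severity(
--     conflicts: List[Dict[str, Any]]
-- ) -> Dict[str, int]:
--     """评估冲突严重性分布"""
--     severity_count = {"high": 0, "medium": 0, "low": 0}
--
--     for conflict in conflicts:
--         conflict_type = conflict.get("type", "")
--
--         if conflict_type in ["resource_conflict", "influence_chain_conflict"]:
--             severity_count["high"] += 1
--         elif conflict_type in ["goal_conflict", "timeline_conflict"]: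
--             severity_count["medium"] += 1
--         else:
--             severity_count["low"] += 1
--
--     return severity_count
-- ===== SOURCE B (Python) =====
-- def _assess_conflict_severity(conflicts):
--     """Tabulate conflict types once, then aggregate; 'low' is the catch-all by subtraction."""
--     counts = {}
--     for c in conflicts:
--         t = c.get("type", "")
--         counts[t] = counts.get(t, 0) + 1
--     high = counts.get("resource_conflict", 0) + counts.get("influence_chain_conflict", 0)
--     medium = counts.get("goal_conflict", 0) + counts.get("timeline_conflict", 0)
--     return {"high": high, "medium": medium, "low": len(conflicts) - high - medium}
-- ===== Notes on version B (the rewrite author's own statement) =====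
-- stated objective: alternative
-- what changed: Replaces per-item if/elif/else bucket classification with a tabulate-then-aggregate shape: build a frequency table of conflict types in one pass, then compute high and medium by summing two table entries each and low as total minus high minus medium.
import Mathlib
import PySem

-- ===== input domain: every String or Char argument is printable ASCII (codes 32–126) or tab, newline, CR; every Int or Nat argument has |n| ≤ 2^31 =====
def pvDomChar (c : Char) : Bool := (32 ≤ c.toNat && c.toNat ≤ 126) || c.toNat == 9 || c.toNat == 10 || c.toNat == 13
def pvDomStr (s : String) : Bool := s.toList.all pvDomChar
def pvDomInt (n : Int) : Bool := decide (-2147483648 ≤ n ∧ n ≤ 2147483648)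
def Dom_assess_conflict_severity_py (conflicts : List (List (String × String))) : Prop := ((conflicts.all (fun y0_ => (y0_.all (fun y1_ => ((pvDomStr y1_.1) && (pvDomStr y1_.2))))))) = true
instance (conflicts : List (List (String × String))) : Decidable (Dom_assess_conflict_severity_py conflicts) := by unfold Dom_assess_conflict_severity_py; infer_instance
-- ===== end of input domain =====

-- B tabulates conflict types into a frequency table once, then aggregates (low = total − high − medium); alternative decomposition, same cost.


-- ===== PORT A =====
-- conflict.get("type", "") : first-match lookup in the association list (a Python dict)
def pvTyp (conflict : List (String × String)) : String :=
  (PySem.Dict.mk conflict).getD "type" ""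

def assess_conflict_severity_py (conflicts : List (List (String × String))) : List (String × Int) :=
  (conflicts.foldl
    (fun severity_count conflict =>
      let conflict_type := pvTyp conflict
      if conflict_type = "resource_conflict" ∨ conflict_type = "influence_chain_conflict" then
        severity_count.modify "high" 0 (· + 1)
      else if conflict_type = "goal_conflict" ∨ conflict_type = "timeline_conflict" then
        severity_count.modify "medium" 0 (· + 1)
      else
        severity_count.modify "low" 0 (· + 1))
    (PySem.Dict.ofList [("high", 0), ("medium", 0), ("low", 0)])).items

-- ===== PORT B =====
def assess_conflict_severity_py_alt (conflicts : List (List (String × String))) : List (String × Int) :=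
  let counts :=
    conflicts.foldl (fun d c => let t := pvTyp c; d.insert t (d.getD t 0 + 1))
      (PySem.Dict.empty : PySem.Dict String Int)
  let high := counts.getD "resource_conflict" 0 + counts.getD "influence_chain_conflict" 0
  let medium := counts.getD "goal_conflict" 0 + counts.getD "timeline_conflict" 0
  [("high", high), ("medium", medium), ("low", (conflicts.length : Int) - high - medium)]

-- ===== PRECONDITION & SPEC =====
def Spec_assess_conflict_severity_py (conflicts : List (List (String × String))) (out : List (String × Int)) : Prop := out = assess_conflict_severity_py_alt conflicts
instance (conflicts : List (List (String × String))) (out : List (String × Int)) : Decidable (Spec_assess_conflict_severity_py conflicts out) := by unfold Spec_assess_conflict_severity_py; infer_instance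

-- ===== CLAIM (what is proved, stated in full; the proofs are below) =====
def Claim_equal_assess_conflict_severity_py : Prop := ∀ (conflicts : List (List (String × String))), Dom_assess_conflict_severity_py conflicts → Spec_assess_conflict_severity_py conflicts (assess_conflict_severity_py conflicts)

-- ===== LEMMAS AND PROOFS =====

-- A's fold over the literal three-key dict, characterised by the three bucket counts
theorem foldA_char (l : List (List (String × String))) : ∀ (a b c : Int),
    (l.foldl
      (fun severity_count conflict =>
        let conflict_type := pvTyp conflict
        if conflict_type = "resource_conflict" ∨ conflict_type = "influence_chain_conflict" then
          severity_count.modify "high" 0 (· + 1)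
        else if conflict_type = "goal_conflict" ∨ conflict_type = "timeline_conflict" then
          severity_count.modify "medium" 0 (· + 1)
        else
          severity_count.modify "low" 0 (· + 1))
      (PySem.Dict.mk [("high", a), ("medium", b), ("low", c)])) =
    PySem.Dict.mk
      [("high", a + l.countP (fun x => decide (pvTyp x = "resource_conflict" ∨ pvTyp x = "influence_chain_conflict"))),
       ("medium", b + l.countP (fun x => decide (pvTyp x = "goal_conflict" ∨ pvTyp x = "timeline_conflict"))),
       ("low", c + l.countP (fun x => decide (¬ (pvTyp x = "resource_conflict" ∨ pvTyp x = "influence_chain_conflict") ∧ ¬ (pvTyp x = "goal_conflict" ∨ pvTyp x = "timeline_conflict"))))] := by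
  induction l with
  | nil => intro a b c; simp
  | cons hd tl ih =>
    intro a b c
    simp only [List.foldl_cons, List.countP_cons]
    by_cases hH : pvTyp hd = "resource_conflict" ∨ pvTyp hd = "influence_chain_conflict"
    · have hM : ¬ (pvTyp hd = "goal_conflict" ∨ pvTyp hd = "timeline_conflict") := by
        rintro (h2 | h2) <;> rcases hH with h | h <;> rw [h] at h2 <;> exact absurd h2 (by decide)
      rw [if_pos hH]
      have hmod : (PySem.Dict.mk [("high", a), ("medium", b), ("low", c)]).modify "high" 0 (· + 1) =
          PySem.Dict.mk [("high", a + 1), ("medium", b), ("low", c)] := by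
        simp [PySem.Dict.modify, PySem.Dict.contains, PySem.Dict.getD, PySem.Dict.get?,
          PySem.Dict.insert]
      rw [hmod, ih]
      simp only [PySem.Dict.mk.injEq, List.cons.injEq, Prod.mk.injEq, and_true, true_and]
      simp [hH, hM]
      all_goals omega
    · by_cases hM : pvTyp hd = "goal_conflict" ∨ pvTyp hd = "timeline_conflict"
      · rw [if_neg hH, if_pos hM]
        have hmod : (PySem.Dict.mk [("high", a), ("medium", b), ("low", c)]).modify "medium" 0 (· + 1) =
            PySem.Dict.mk [("high", a), ("medium", b + 1), ("low", c)] := by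
          simp [PySem.Dict.modify, PySem.Dict.contains, PySem.Dict.getD, PySem.Dict.get?,
            PySem.Dict.insert]
        rw [hmod, ih]
        simp only [PySem.Dict.mk.injEq, List.cons.injEq, Prod.mk.injEq, and_true, true_and]
        simp [hH, hM]
        all_goals omega
      · rw [if_neg hH, if_neg hM]
        have hmod : (PySem.Dict.mk [("high", a), ("medium", b), ("low", c)]).modify "low" 0 (· + 1) =
            PySem.Dict.mk [("high", a), ("medium", b), ("low", c + 1)] := by
          simp [PySem.Dict.modify, PySem.Dict.contains, PySem.Dict.getD, PySem.Dict.get?,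
            PySem.Dict.insert]
        rw [hmod, ih]
        simp only [PySem.Dict.mk.injEq, List.cons.injEq, Prod.mk.injEq, and_true, true_and]
        simp [hH, hM]
        all_goals omega

-- the high bucket splits into the two type counts (the two type strings are distinct)
theorem countP_high_split (l : List (List (String × String))) :
    (l.countP (fun x => decide (pvTyp x = "resource_conflict" ∨ pvTyp x = "influence_chain_conflict")) : Int) =
      l.countP (fun x => pvTyp x == "resource_conflict") +
      l.countP (fun x => pvTyp x == "influence_chain_conflict") := by
  induction l with
  | nil => simp
  | cons hd tl ih =>
    simp only [List.countP_cons]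
    simp only [Bool.decide_or] at ih ⊢
    by_cases h1 : pvTyp hd = "resource_conflict"
    · have h2 : pvTyp hd ≠ "influence_chain_conflict" := by rw [h1]; decide
      simp [h1]; omega
    · by_cases h2 : pvTyp hd = "influence_chain_conflict"
      · simp [h2]; omega
      · simp [h1, h2]; omega

theorem countP_med_split (l : List (List (String × String))) :
    (l.countP (fun x => decide (pvTyp x = "goal_conflict" ∨ pvTyp x = "timeline_conflict")) : Int) =
      l.countP (fun x => pvTyp x == "goal_conflict") +
      l.countP (fun x => pvTyp x == "timeline_conflict") := by
  induction l with
  | nil => simp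
  | cons hd tl ih =>
    simp only [List.countP_cons]
    simp only [Bool.decide_or] at ih ⊢
    by_cases h1 : pvTyp hd = "goal_conflict"
    · have h2 : pvTyp hd ≠ "timeline_conflict" := by rw [h1]; decide
      simp [h1]; omega
    · by_cases h2 : pvTyp hd = "timeline_conflict"
      · simp [h2]; omega
      · simp [h1, h2]; omega

-- the three buckets partition the list
theorem countP_partition (l : List (List (String × String))) :
    l.countP (fun x => decide (pvTyp x = "resource_conflict" ∨ pvTyp x = "influence_chain_conflict")) +
    l.countP (fun x => decide (pvTyp x = "goal_conflict" ∨ pvTyp x = "timeline_conflict")) +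
    l.countP (fun x => decide (¬ (pvTyp x = "resource_conflict" ∨ pvTyp x = "influence_chain_conflict") ∧ ¬ (pvTyp x = "goal_conflict" ∨ pvTyp x = "timeline_conflict"))) = l.length := by
  induction l with
  | nil => simp
  | cons hd tl ih =>
    simp only [List.countP_cons, List.length_cons]
    by_cases hH : pvTyp hd = "resource_conflict" ∨ pvTyp hd = "influence_chain_conflict"
    · have hM : ¬ (pvTyp hd = "goal_conflict" ∨ pvTyp hd = "timeline_conflict") := by
        rintro (h2 | h2) <;> rcases hH with h | h <;> rw [h] at h2 <;> exact absurd h2 (by decide)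
      simp at ih
      simp [hH, hM]; omega
    · by_cases hM : pvTyp hd = "goal_conflict" ∨ pvTyp hd = "timeline_conflict"
      · simp at ih
        simp [hH, hM]; omega
      · simp at ih
        simp [hH, hM]; omega

-- B's frequency-table lookup is the per-type count
theorem counts_getD (l : List (List (String × String))) (v : String) :
    (l.foldl (fun d c => let t := pvTyp c; d.insert t (d.getD t 0 + 1))
        (PySem.Dict.empty : PySem.Dict String Int)).getD v 0 =
      (l.countP (fun x => pvTyp x == v) : Int) := by
  have hmap : l.foldl (fun d c => let t := pvTyp c; d.insert t (d.getD t 0 + 1))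
      (PySem.Dict.empty : PySem.Dict String Int) =
      (l.map pvTyp).foldl (fun d t => d.insert t (d.getD t 0 + 1))
        (PySem.Dict.empty : PySem.Dict String Int) := by
    rw [List.foldl_map]
  rw [hmap, PySem.Dict.getD_foldl_insert_add_one]
  simp only [PySem.Dict.getD_empty, List.count, List.countP_map, Int.zero_add]
  rfl

-- ===== VERDICT (by name: the statement is the Claim_ definition above) =====
theorem assess_conflict_severity_py_spec : Claim_equal_assess_conflict_severity_py := by
  intro conflicts _
  unfold Spec_assess_conflict_severity_py assess_conflict_severity_py assess_conflict_severity_py_alt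
  rw [show (PySem.Dict.ofList [("high", (0:Int)), ("medium", 0), ("low", 0)]) =
      PySem.Dict.mk [("high", 0), ("medium", 0), ("low", 0)] from rfl]
  rw [foldA_char]
  simp only [counts_getD]
  have h1 := countP_high_split conflicts
  have h2 := countP_med_split conflicts
  have h3 := countP_partition conflicts
  simp only [List.cons.injEq, Prod.mk.injEq, true_and, and_true]
  refine ⟨by omega, by omega, by omega⟩
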